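-- pv_equiv track=rewrite | github.com/Issa-Kakar/CodeDocSync | codedocsync/suggestions/style_detector.py | _validate_google_style
-- ===== SOURCE A (Python) =====
-- def _validate_google_style(text: str) -> list[str]:
--     """Validate Google-style specific formatting."""
--     issues = []
--     lines = text.split("\n")
--
--     # Check section headers end with colon
--     google_sections = [
--         "Args",
--         "Arguments",
--         "Returns",
--         "Return",
--         "Yields",
--         "Raises",
--         "Note",
--         "Example",
--     ]
--     for i, line in enumerate(lines):
--         line_stripped = line.strip()
--         for section in google_sections:
--             if line_stripped == section:  # Section without colon
--                 issues.append(
--                     f"Google style section '{section}' should end with colon"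
--                 )
--             elif line_stripped == f"{section}:":
--                 # Check next non-empty line is indented
--                 for j in range(i + 1, len(lines)):
--                     if lines[j].strip():
--                         if not lines[j].startswith("    "):
--                             issues.append(
--                                 f"Content after '{section}:' should be indented 4 spaces"
--                             )
--                         break
--
--     return issues
-- ===== SOURCE B (Python) =====
-- def _validate_google_style(text: str) -> list[str]:
--     """Validate Google-style specific formatting."""
--     lines = text.split("\n")
--
--     # Lookup table: bare name -> colon-missing message, "Name:" -> indentation message.
--     table = {}
--     for section in ["Args", "Arguments", "Returns", "Return", "Yields",
--                     "Raises", "Note", "Example"]: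
--         table[section] = ("bare", f"Google style section '{section}' should end with colon")
--         table[section + ":"] = ("colon", f"Content after '{section}:' should be indented 4 spaces")
--
--     # Backward pass: next_nonempty[i] = first non-empty line after line i (or None).
--     next_nonempty = [None] * len(lines)
--     nxt = None
--     for i in range(len(lines) - 1, -1, -1):
--         next_nonempty[i] = nxt
--         if lines[i].strip():
--             nxt = lines[i]
--
--     # Single forward pass with table lookups.
--     issues = []
--     for line, nxt_line in zip(lines, next_nonempty):
--         hit = table.get(line.strip())
--         if hit is None:
--             continue
--         kind, msg = hit
--         if kind == "bare":
--             issues.append(msg)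
--         elif nxt_line is not None and not nxt_line.startswith("    "):
--             issues.append(msg)
--     return issues
-- ===== Notes on version B (the rewrite author's own statement) =====
-- stated objective: alternative
-- what changed: Replaces A's per-line inner loop over the 8 section names and the per-header forward rescan for the next non-empty line by a section lookup table built once plus a single backward pass precomputing the next non-empty line for every position, then one forward pass with table lookups.
import Mathlib
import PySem

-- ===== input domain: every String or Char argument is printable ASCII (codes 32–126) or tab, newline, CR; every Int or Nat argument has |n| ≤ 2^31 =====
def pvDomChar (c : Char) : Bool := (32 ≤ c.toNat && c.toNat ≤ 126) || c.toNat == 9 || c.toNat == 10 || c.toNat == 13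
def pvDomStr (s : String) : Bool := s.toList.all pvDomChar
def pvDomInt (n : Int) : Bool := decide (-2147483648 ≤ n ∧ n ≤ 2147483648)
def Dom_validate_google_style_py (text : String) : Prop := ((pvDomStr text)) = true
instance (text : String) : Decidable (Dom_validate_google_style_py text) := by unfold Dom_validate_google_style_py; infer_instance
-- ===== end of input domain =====

-- B replaces A's per-line inner scan over the section list and the per-header forward rescan
-- for the next non-empty line by a precomputed lookup table and one backward pass (objective: alternative/simpler traversal).

-- ===== PORT A =====
def googleSections : List String :=
  ["Args", "Arguments", "Returns", "Return", "Yields", "Raises", "Note", "Example"]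

-- inner loop 'for j in range(i+1, len(lines)): if lines[j].strip(): …; break'
-- (pyGetD is exact here: every j produced by this range is a valid index of lines)
def aScan (lines : List String) (sec : String) : List Int → List String
  | [] => []
  | j :: rest =>
    let lj := PySem.List.pyGetD lines j ""
    if PySem.Str.strip lj ≠ "" then
      if !(PySem.Str.startswith lj "    ") then
        ["Content after '" ++ sec ++ ":' should be indented 4 spaces"]
      else []
    else aScan lines sec rest

def validate_google_style_py (text : String) : List String :=
  let lines := (PySem.Str.split? text "\n").getD []  -- sep is the non-empty literal "\n": split? is always some
  (PySem.List.enumerate lines).foldl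
    (fun issues p =>
      let ls := PySem.Str.strip p.2
      googleSections.foldl
        (fun issues sec =>
          if ls = sec then
            issues ++ ["Google style section '" ++ sec ++ "' should end with colon"]
          else if ls = sec ++ ":" then
            issues ++ aScan lines sec (PySem.List.pyRange (p.1 + 1) lines.length 1)
          else issues)
        issues)
    []

-- ===== PORT B =====
def bTable : PySem.Dict String (String × String) :=
  ["Args", "Arguments", "Returns", "Return", "Yields", "Raises", "Note", "Example"].foldl
    (fun d sec =>
      (d.insert sec ("bare", "Google style section '" ++ sec ++ "' should end with colon")).insert
        (sec ++ ":") ("colon", "Content after '" ++ sec ++ ":' should be indented 4 spaces"))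
    PySem.Dict.empty

-- backward index loop 'for i in range(len(lines)-1, -1, -1)' as a fold over the reversed list
def bBuild : List String → Option String → List (Option String)
  | [], _ => []
  | l :: rest, nxt =>
    nxt :: bBuild rest (if PySem.Str.strip l ≠ "" then some l else nxt)

def validate_google_style_py_alt (text : String) : List String :=
  let lines := (PySem.Str.split? text "\n").getD []  -- sep is the non-empty literal "\n": split? is always some
  let nexts := (bBuild lines.reverse none).reverse
  (lines.zip nexts).foldl
    (fun issues p =>
      match bTable.get? (PySem.Str.strip p.1) with
      | none => issues
      | some (kind, msg) =>
        if kind = "bare" then issues ++ [msg]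
        else
          match p.2 with
          | some nl => if !(PySem.Str.startswith nl "    ") then issues ++ [msg] else issues
          | none => issues)
    []

-- ===== PRECONDITION & SPEC =====
def Spec_validate_google_style_py (text : String) (out : List String) : Prop := out = validate_google_style_py_alt text
instance (text : String) (out : List String) : Decidable (Spec_validate_google_style_py text out) := by unfold Spec_validate_google_style_py; infer_instance

-- ===== CLAIM (what is proved, stated in full; the proofs are below) =====
def Claim_equal_validate_google_style_py : Prop := ∀ (text : String), Dom_validate_google_style_py text → Spec_validate_google_style_py text (validate_google_style_py text)

-- ===== LEMMAS AND PROOFS =====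

def pNE (l : String) : Bool := PySem.Str.strip l ≠ ""

def nextsSpec : List String → List (Option String)
  | [] => []
  | _ :: rest => (rest.find? pNE) :: nextsSpec rest

def nextsSpecD (acc : Option String) : List String → List (Option String)
  | [] => []
  | _ :: rest => ((rest.find? pNE).or acc) :: nextsSpecD acc rest

lemma nextsSpecD_append_singleton (l : List String) (x : String) (acc : Option String) :
    nextsSpecD acc (l ++ [x]) = nextsSpecD (if pNE x then some x else acc) l ++ [acc] := by
  induction l with
  | nil => cases h : pNE x <;> simp [nextsSpecD]
  | cons y l ih =>
    simp only [List.cons_append, nextsSpecD, ih, List.find?_append]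
    congr 1
    cases h : l.find? pNE <;> cases hx : pNE x <;> simp [hx, Option.or]

lemma bBuild_reverse (r : List String) (acc : Option String) :
    (bBuild r acc).reverse = nextsSpecD acc r.reverse := by
  induction r generalizing acc with
  | nil => simp [bBuild, nextsSpecD]
  | cons x r ih =>
    simp only [bBuild, List.reverse_cons, ih, nextsSpecD_append_singleton]
    congr 1
    by_cases h : pNE x
    · simp [pNE] at h; simp [h, pNE]
    · simp [pNE] at h; simp [h, pNE]

lemma nextsSpecD_none (l : List String) : nextsSpecD none l = nextsSpec l := by
  induction l with
  | nil => rfl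
  | cons x l ih => simp [nextsSpecD, nextsSpec, ih, Option.or_none]

lemma bNexts_eq (lines : List String) :
    (bBuild lines.reverse none).reverse = nextsSpec lines := by
  rw [bBuild_reverse, List.reverse_reverse, nextsSpecD_none]

def scanSpec (sec : String) : Option String → List String
  | none => []
  | some nl =>
    if !(PySem.Str.startswith nl "    ") then
      ["Content after '" ++ sec ++ ":' should be indented 4 spaces"]
    else []

lemma aScan_eq (lines : List String) (sec : String) :
    ∀ (suffix : List String) (i : Nat), lines.drop i = suffix →
    aScan lines sec (PySem.List.pyRange (i : Int) (lines.length : Int) 1) = scanSpec sec (suffix.find? pNE) := by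
  intro suffix
  induction suffix with
  | nil =>
    intro i h
    have hlen : lines.length ≤ i := List.drop_eq_nil_iff.mp h
    rw [PySem.List.pyRange_one_eq_nil (by exact_mod_cast hlen)]
    simp [aScan, scanSpec]
  | cons x rest ih =>
    intro i h
    have hx : lines[i]? = some x := by
      have := congrArg (·[0]?) h
      simpa [List.getElem?_drop] using this
    obtain ⟨hi, hxx⟩ := List.getElem?_eq_some_iff.mp hx
    have hrest : lines.drop (i + 1) = rest := by
      rw [← List.tail_drop, h, List.tail_cons]
    rw [PySem.List.pyRange_one_cons (by exact_mod_cast hi)]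
    simp only [aScan]
    rw [show PySem.List.pyGetD lines (i : Int) "" = x by
      simp [PySem.List.pyGetD_natCast, List.getD, hx]]
    by_cases hne : PySem.Str.strip x ≠ ""
    · rw [if_pos hne, List.find?_cons_of_pos (by simp [pNE, hne])]
      rfl
    · rw [if_neg hne, List.find?_cons_of_neg (by simp [pNE]; simpa using hne)]
      have := ih (i + 1) hrest
      rw [show ((i : Int) + 1) = ((i + 1 : Nat) : Int) by push_cast; ring]
      exact this

def gA (ls : String) (o : Option String) : List String :=
  googleSections.flatMap (fun sec =>
    if ls = sec then ["Google style section '" ++ sec ++ "' should end with colon"]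
    else if ls = sec ++ ":" then scanSpec sec o
    else [])

def gB (ls : String) (o : Option String) : List String :=
  match bTable.get? ls with
  | none => []
  | some (kind, msg) =>
    if kind = "bare" then [msg]
    else
      match o with
      | some nl => if !(PySem.Str.startswith nl "    ") then [msg] else []
      | none => []

lemma gA_eq_gB (ls : String) (o : Option String) : gA ls o = gB ls o := by
  by_cases h1 : ls = "Args"
  · subst h1
    have hl : bTable.get? "Args" = some ("bare", "Google style section 'Args' should end with colon") := rfl
    cases o <;> simp [gA, gB, googleSections, scanSpec, hl]
  by_cases h2 : ls = "Args:"
  · subst h2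
    have hl : bTable.get? "Args:" = some ("colon", "Content after 'Args:' should be indented 4 spaces") := rfl
    cases o <;> simp [gA, gB, googleSections, scanSpec, hl]
  by_cases h3 : ls = "Arguments"
  · subst h3
    have hl : bTable.get? "Arguments" = some ("bare", "Google style section 'Arguments' should end with colon") := rfl
    cases o <;> simp [gA, gB, googleSections, scanSpec, hl]
  by_cases h4 : ls = "Arguments:"
  · subst h4
    have hl : bTable.get? "Arguments:" = some ("colon", "Content after 'Arguments:' should be indented 4 spaces") := rfl
    cases o <;> simp [gA, gB, googleSections, scanSpec, hl]
  by_cases h5 : ls = "Returns"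
  · subst h5
    have hl : bTable.get? "Returns" = some ("bare", "Google style section 'Returns' should end with colon") := rfl
    cases o <;> simp [gA, gB, googleSections, scanSpec, hl]
  by_cases h6 : ls = "Returns:"
  · subst h6
    have hl : bTable.get? "Returns:" = some ("colon", "Content after 'Returns:' should be indented 4 spaces") := rfl
    cases o <;> simp [gA, gB, googleSections, scanSpec, hl]
  by_cases h7 : ls = "Return"
  · subst h7
    have hl : bTable.get? "Return" = some ("bare", "Google style section 'Return' should end with colon") := rfl
    cases o <;> simp [gA, gB, googleSections, scanSpec, hl]
  by_cases h8 : ls = "Return:"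
  · subst h8
    have hl : bTable.get? "Return:" = some ("colon", "Content after 'Return:' should be indented 4 spaces") := rfl
    cases o <;> simp [gA, gB, googleSections, scanSpec, hl]
  by_cases h9 : ls = "Yields"
  · subst h9
    have hl : bTable.get? "Yields" = some ("bare", "Google style section 'Yields' should end with colon") := rfl
    cases o <;> simp [gA, gB, googleSections, scanSpec, hl]
  by_cases h10 : ls = "Yields:"
  · subst h10
    have hl : bTable.get? "Yields:" = some ("colon", "Content after 'Yields:' should be indented 4 spaces") := rfl
    cases o <;> simp [gA, gB, googleSections, scanSpec, hl]
  by_cases h11 : ls = "Raises"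
  · subst h11
    have hl : bTable.get? "Raises" = some ("bare", "Google style section 'Raises' should end with colon") := rfl
    cases o <;> simp [gA, gB, googleSections, scanSpec, hl]
  by_cases h12 : ls = "Raises:"
  · subst h12
    have hl : bTable.get? "Raises:" = some ("colon", "Content after 'Raises:' should be indented 4 spaces") := rfl
    cases o <;> simp [gA, gB, googleSections, scanSpec, hl]
  by_cases h13 : ls = "Note"
  · subst h13
    have hl : bTable.get? "Note" = some ("bare", "Google style section 'Note' should end with colon") := rfl
    cases o <;> simp [gA, gB, googleSections, scanSpec, hl]
  by_cases h14 : ls = "Note:"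
  · subst h14
    have hl : bTable.get? "Note:" = some ("colon", "Content after 'Note:' should be indented 4 spaces") := rfl
    cases o <;> simp [gA, gB, googleSections, scanSpec, hl]
  by_cases h15 : ls = "Example"
  · subst h15
    have hl : bTable.get? "Example" = some ("bare", "Google style section 'Example' should end with colon") := rfl
    cases o <;> simp [gA, gB, googleSections, scanSpec, hl]
  by_cases h16 : ls = "Example:"
  · subst h16
    have hl : bTable.get? "Example:" = some ("colon", "Content after 'Example:' should be indented 4 spaces") := rfl
    cases o <;> simp [gA, gB, googleSections, scanSpec, hl]
  have hnone : bTable.get? ls = none := by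
    rw [PySem.Dict.get?_eq_none_iff_not_mem_keys]
    have hk : bTable.keys = ["Args", "Args:", "Arguments", "Arguments:", "Returns", "Returns:", "Return", "Return:", "Yields", "Yields:", "Raises", "Raises:", "Note", "Note:", "Example", "Example:"] := rfl
    simp only [hk, List.mem_cons, List.not_mem_nil, or_false]
    push Not
    exact ⟨h1, h2, h3, h4, h5, h6, h7, h8, h9, h10, h11, h12, h13, h14, h15, h16⟩
  cases o <;> simp [gA, gB, googleSections, scanSpec, hnone, h1, h2, h3, h4, h5, h6, h7, h8, h9, h10, h11, h12, h13, h14, h15, h16]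

lemma foldA_flatMap (lines : List String) :
    (PySem.List.enumerate lines).foldl
      (fun issues p =>
        let ls := PySem.Str.strip p.2
        googleSections.foldl
          (fun issues sec =>
            if ls = sec then
              issues ++ ["Google style section '" ++ sec ++ "' should end with colon"]
            else if ls = sec ++ ":" then
              issues ++ aScan lines sec (PySem.List.pyRange (p.1 + 1) lines.length 1)
            else issues)
          issues)
      []
    = (PySem.List.enumerate lines).flatMap (fun p =>
        googleSections.flatMap (fun sec =>
          if PySem.Str.strip p.2 = sec then ["Google style section '" ++ sec ++ "' should end with colon"]
          else if PySem.Str.strip p.2 = sec ++ ":" then aScan lines sec (PySem.List.pyRange (p.1 + 1) lines.length 1)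
          else [])) := by
  have hstep : ∀ (issues : List String) (p : Int × String),
      (let ls := PySem.Str.strip p.2
       googleSections.foldl
        (fun issues sec =>
          if ls = sec then
            issues ++ ["Google style section '" ++ sec ++ "' should end with colon"]
          else if ls = sec ++ ":" then
            issues ++ aScan lines sec (PySem.List.pyRange (p.1 + 1) lines.length 1)
          else issues)
        issues)
      = issues ++ googleSections.flatMap (fun sec =>
          if PySem.Str.strip p.2 = sec then ["Google style section '" ++ sec ++ "' should end with colon"]
          else if PySem.Str.strip p.2 = sec ++ ":" then aScan lines sec (PySem.List.pyRange (p.1 + 1) lines.length 1)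
          else []) := by
    intro issues p
    dsimp only
    rw [show (fun issues sec =>
          if PySem.Str.strip p.2 = sec then
            issues ++ ["Google style section '" ++ sec ++ "' should end with colon"]
          else if PySem.Str.strip p.2 = sec ++ ":" then
            issues ++ aScan lines sec (PySem.List.pyRange (p.1 + 1) lines.length 1)
          else issues)
        = (fun (issues : List String) sec => issues ++
            (if PySem.Str.strip p.2 = sec then ["Google style section '" ++ sec ++ "' should end with colon"]
             else if PySem.Str.strip p.2 = sec ++ ":" then aScan lines sec (PySem.List.pyRange (p.1 + 1) lines.length 1)
             else [])) from by funext issues sec; split_ifs <;> simp]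
    exact PySem.List.foldl_append_eq_flatMap _ _ _
  calc (PySem.List.enumerate lines).foldl _ []
      = (PySem.List.enumerate lines).foldl (fun issues p => issues ++ googleSections.flatMap (fun sec =>
          if PySem.Str.strip p.2 = sec then ["Google style section '" ++ sec ++ "' should end with colon"]
          else if PySem.Str.strip p.2 = sec ++ ":" then aScan lines sec (PySem.List.pyRange (p.1 + 1) lines.length 1)
          else [])) [] := by
        apply List.foldl_ext
        intro acc p _
        exact hstep acc p
    _ = _ := by rw [PySem.List.foldl_append_eq_flatMap]; simp

lemma mainZ (full : List String) :
    ∀ (suffix : List String) (s : Nat), full.drop s = suffix →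
    (PySem.List.enumerate suffix (s : Int)).flatMap (fun p =>
        googleSections.flatMap (fun sec =>
          if PySem.Str.strip p.2 = sec then ["Google style section '" ++ sec ++ "' should end with colon"]
          else if PySem.Str.strip p.2 = sec ++ ":" then aScan full sec (PySem.List.pyRange (p.1 + 1) full.length 1)
          else []))
    = (suffix.zip (nextsSpec suffix)).flatMap (fun p => gB (PySem.Str.strip p.1) p.2) := by
  intro suffix
  induction suffix with
  | nil => intro s h; simp [PySem.List.enumerate_nil, nextsSpec]
  | cons x rest ih =>
    intro s h
    have hrest : full.drop (s + 1) = rest := by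
      rw [← List.tail_drop, h, List.tail_cons]
    rw [PySem.List.enumerate_cons]
    simp only [nextsSpec, List.zip_cons_cons, List.flatMap_cons]
    congr 1
    · have hscan : ∀ sec, aScan full sec (PySem.List.pyRange ((s : Int) + 1) full.length 1)
          = scanSpec sec (rest.find? pNE) := by
        intro sec
        rw [show ((s : Int) + 1) = ((s + 1 : Nat) : Int) by push_cast; ring]
        exact aScan_eq full sec rest (s + 1) hrest
      have : (fun sec =>
          if PySem.Str.strip x = sec then ["Google style section '" ++ sec ++ "' should end with colon"]
          else if PySem.Str.strip x = sec ++ ":" then aScan full sec (PySem.List.pyRange ((s : Int) + 1) full.length 1)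
          else [])
        = (fun sec =>
          if PySem.Str.strip x = sec then ["Google style section '" ++ sec ++ "' should end with colon"]
          else if PySem.Str.strip x = sec ++ ":" then scanSpec sec (rest.find? pNE)
          else []) := by
        funext sec; rw [hscan]
      simpa [gA] using (this ▸ gA_eq_gB (PySem.Str.strip x) (rest.find? pNE))
    · exact ih (s + 1) hrest

lemma foldB_flatMap (lines : List String) (nexts : List (Option String)) :
    (lines.zip nexts).foldl
      (fun issues p =>
        match bTable.get? (PySem.Str.strip p.1) with
        | none => issues
        | some (kind, msg) =>
          if kind = "bare" then issues ++ [msg]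
          else
            match p.2 with
            | some nl => if !(PySem.Str.startswith nl "    ") then issues ++ [msg] else issues
            | none => issues)
      []
    = (lines.zip nexts).flatMap (fun p => gB (PySem.Str.strip p.1) p.2) := by
  have hstep : (fun (issues : List String) (p : String × Option String) =>
        match bTable.get? (PySem.Str.strip p.1) with
        | none => issues
        | some (kind, msg) =>
          if kind = "bare" then issues ++ [msg]
          else
            match p.2 with
            | some nl => if !(PySem.Str.startswith nl "    ") then issues ++ [msg] else issues
            | none => issues)
      = (fun issues p => issues ++ gB (PySem.Str.strip p.1) p.2) := by
    funext issues p
    unfold gB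
    cases bTable.get? (PySem.Str.strip p.1) with
    | none => simp
    | some kv =>
      obtain ⟨kind, msg⟩ := kv
      by_cases hk : kind = "bare"
      · simp [hk]
      · cases p.2 with
        | none => simp [hk]
        | some nl => simp only [hk, if_false]; split_ifs <;> simp
  rw [hstep, PySem.List.foldl_append_eq_flatMap]
  simp

-- ===== VERDICT (by name: the statement is the Claim_ definition above) =====
theorem validate_google_style_py_spec : Claim_equal_validate_google_style_py := by
  intro text _
  unfold Spec_validate_google_style_py validate_google_style_py validate_google_style_py_alt
  dsimp only
  rw [foldA_flatMap, foldB_flatMap, bNexts_eq]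
  exact mainZ _ _ 0 rfl
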